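-- pv_equiv track=rewrite | github.com/epilectrik/voynich | phases/MATERIAL_REGIME_MAPPING/scripts/material_regime_mapping.py | get_class_compatible_middles
-- ===== SOURCE A (Python) =====
-- from collections import defaultdict, Counter
--
-- def get_compatible_b_tokens(a_profile, b_tokens):
--     """Apply C502.a filtering."""
--     compatible = []
--     for bt in b_tokens:
--         middle_ok = bt['middle'] in a_profile['middles']
--         prefix_ok = bt['prefix'] in a_profile['prefixes']
--         suffix_ok = bt['suffix'] in a_profile['suffixes']
--         if middle_ok and prefix_ok and suffix_ok:
--             compatible.append(bt)
--     return compatible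
--
-- def get_class_compatible_middles(high_conf_records, a_record_profiles, b_tokens):
--     """Get all compatible B MIDDLEs for a material class."""
--     all_compatible_middles = Counter()
--     for record_id in high_conf_records:
--         if record_id in a_record_profiles:
--             profile = a_record_profiles[record_id]
--             compatible = get_compatible_b_tokens(profile, b_tokens)
--             for t in compatible:
--                 if t['middle']:
--                     all_compatible_middles[t['middle']] += 1
--     return all_compatible_middles
-- ===== SOURCE B (Python) =====
-- from collections import Counter
--
-- def get_class_compatible_middles(high_conf_records, a_record_profiles, b_tokens):
--     """Get all compatible B MIDDLEs for a material class.
--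
--     Builds a (middle, prefix, suffix) signature index over b_tokens once (lazily, on the
--     first matching record); each record then scans only the distinct signatures, weighted
--     by multiplicity.
--     """
--     result = Counter()
--     sig_counts = None
--     for record_id in high_conf_records:
--         if record_id in a_record_profiles:
--             if sig_counts is None:
--                 sig_counts = Counter((bt['middle'], bt['prefix'], bt['suffix']) for bt in b_tokens)
--             profile = a_record_profiles[record_id]
--             for (m, p, s), c in sig_counts.items():
--                 if m and m in profile['middles'] and p in profile['prefixes'] and s in profile['suffixes']:
--                     result[m] += c
--     return result
-- ===== Notes on version B (the rewrite author's own statement) =====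
-- stated objective: alternative
-- what changed: B builds a frequency table (Counter) keyed by each token's (middle, prefix, suffix) signature once (lazily, at the first matching record) and, for every matched record, scans only the distinct signatures weighted by their multiplicity, instead of re-filtering and recounting the full token list once per record; it trades one indexing pass for a per-record scan over distinct signatures instead of all tokens.
import Mathlib
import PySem

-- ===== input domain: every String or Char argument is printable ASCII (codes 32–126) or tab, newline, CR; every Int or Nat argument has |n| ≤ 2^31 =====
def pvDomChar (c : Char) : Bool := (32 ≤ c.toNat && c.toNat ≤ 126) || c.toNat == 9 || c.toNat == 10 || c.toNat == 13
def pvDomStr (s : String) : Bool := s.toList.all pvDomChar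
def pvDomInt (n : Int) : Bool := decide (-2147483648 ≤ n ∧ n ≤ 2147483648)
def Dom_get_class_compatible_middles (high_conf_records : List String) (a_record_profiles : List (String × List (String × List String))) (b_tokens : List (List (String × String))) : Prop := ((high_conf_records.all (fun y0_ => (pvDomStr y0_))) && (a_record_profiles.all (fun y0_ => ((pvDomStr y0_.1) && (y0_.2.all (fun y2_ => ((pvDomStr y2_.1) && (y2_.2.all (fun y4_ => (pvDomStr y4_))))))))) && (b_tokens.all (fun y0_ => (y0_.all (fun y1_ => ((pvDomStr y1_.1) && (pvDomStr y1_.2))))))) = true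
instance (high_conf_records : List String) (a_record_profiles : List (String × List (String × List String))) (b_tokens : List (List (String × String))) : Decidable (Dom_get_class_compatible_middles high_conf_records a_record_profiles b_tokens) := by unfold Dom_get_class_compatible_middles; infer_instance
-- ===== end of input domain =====

-- B groups b_tokens once into a (middle, prefix, suffix)-signature Counter and, per record,
-- scans only the distinct signatures weighted by multiplicity, instead of rescanning every token.

-- ===== PORT A =====
-- bt[k] for the token/profile dicts; total form of the Python [] lookup — Pre_ guarantees the key is present
def pvTokGet (bt : List (String × String)) (k : String) : String :=
  (PySem.Dict.mk bt).getD k ""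
def pvProfGet (p : List (String × List String)) (k : String) : List String :=
  (PySem.Dict.mk p).getD k []

def get_compatible_b_tokens (a_profile : List (String × List String)) (b_tokens : List (List (String × String))) : List (List (String × String)) :=
  b_tokens.foldl (fun compatible bt =>
    let middle_ok := (pvProfGet a_profile "middles").contains (pvTokGet bt "middle")
    let prefix_ok := (pvProfGet a_profile "prefixes").contains (pvTokGet bt "prefix")
    let suffix_ok := (pvProfGet a_profile "suffixes").contains (pvTokGet bt "suffix")
    if middle_ok && prefix_ok && suffix_ok then compatible ++ [bt] else compatible) []

def get_class_compatible_middles (high_conf_records : List String) (a_record_profiles : List (String × List (String × List String))) (b_tokens : List (List (String × String))) : List (String × Int) :=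
  (high_conf_records.foldl (fun all_compatible_middles record_id =>
    if (PySem.Dict.mk a_record_profiles).contains record_id then
      let profile := (PySem.Dict.mk a_record_profiles).getD record_id []
      let compatible := get_compatible_b_tokens profile b_tokens
      compatible.foldl (fun all_compatible_middles t =>
        if pvTokGet t "middle" ≠ "" then
          PySem.Dict.modify all_compatible_middles (pvTokGet t "middle") 0 (· + 1)
        else all_compatible_middles) all_compatible_middles
    else all_compatible_middles) PySem.Dict.empty).items

-- ===== PORT B =====
def pvSig (bt : List (String × String)) : String × String × String :=
  (pvTokGet bt "middle", pvTokGet bt "prefix", pvTokGet bt "suffix")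

def get_class_compatible_middles_alt (high_conf_records : List String) (a_record_profiles : List (String × List (String × List String))) (b_tokens : List (List (String × String))) : List (String × Int) :=
  (high_conf_records.foldl
    (fun (st : PySem.Dict String Int × Option (PySem.Dict (String × String × String) Int)) record_id =>
      if (PySem.Dict.mk a_record_profiles).contains record_id then
        let sig_counts := st.2.getD (PySem.Dict.counter (b_tokens.map pvSig))
        let profile := (PySem.Dict.mk a_record_profiles).getD record_id []
        (sig_counts.items.foldl (fun result sc =>
          if (sc.1.1 != "") && (pvProfGet profile "middles").contains sc.1.1
              && (pvProfGet profile "prefixes").contains sc.1.2.1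
              && (pvProfGet profile "suffixes").contains sc.1.2.2 then
            PySem.Dict.modify result sc.1.1 0 (· + sc.2)
          else result) st.1, some sig_counts)
      else st)
    (PySem.Dict.empty, none)).1.items

-- ===== PRECONDITION & SPEC =====
def pvHasKeys {ν : Type} (d : List (String × ν)) (ks : List String) : Bool :=
  ks.all (fun k => (PySem.Dict.mk d).contains k)

-- Pre_ excludes (a) exactly the inputs on which the Python A raises KeyError: some record matches a
-- profile while either a token dict is missing one of the keys 'middle'/'prefix'/'suffix' or a matched
-- profile is missing one of 'middles'/'prefixes'/'suffixes' (with b_tokens non-empty); and (b) association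
-- lists with duplicate keys, which do not represent a Python dict (first-vs-last match is accidental).
def Pre_get_class_compatible_middles (high_conf_records : List String) (a_record_profiles : List (String × List (String × List String))) (b_tokens : List (List (String × String))) : Prop :=
  (b_tokens = [] ∨
    (((∃ rid ∈ high_conf_records, (PySem.Dict.mk a_record_profiles).contains rid = true) →
        ∀ bt ∈ b_tokens, pvHasKeys bt ["middle", "prefix", "suffix"] = true) ∧
     (∀ rid ∈ high_conf_records,
        (((PySem.Dict.mk a_record_profiles).get? rid).map
          (fun prof => pvHasKeys prof ["middles", "prefixes", "suffixes"])).getD true = true))) ∧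
  (a_record_profiles.map (·.1)).Nodup ∧
  (∀ pr ∈ a_record_profiles, (pr.2.map (·.1)).Nodup) ∧
  (∀ bt ∈ b_tokens, (bt.map (·.1)).Nodup)
instance (high_conf_records : List String) (a_record_profiles : List (String × List (String × List String))) (b_tokens : List (List (String × String))) : Decidable (Pre_get_class_compatible_middles high_conf_records a_record_profiles b_tokens) := by unfold Pre_get_class_compatible_middles; infer_instance

def pvWitness_get_class_compatible_middles : List String × (List (String × List (String × List String))) × (List (List (String × String))) :=
  (["r1", "r2"],
   [("r1", [("middles", ["qo", ""]), ("prefixes", [""]), ("suffixes", ["dy"])])],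
   [[("middle", "qo"), ("prefix", ""), ("suffix", "dy")],
    [("middle", "qo"), ("prefix", ""), ("suffix", "dy")],
    [("middle", ""), ("prefix", ""), ("suffix", "dy")]])

def Spec_get_class_compatible_middles (high_conf_records : List String) (a_record_profiles : List (String × List (String × List String))) (b_tokens : List (List (String × String))) (out : List (String × Int)) : Prop := out = get_class_compatible_middles_alt high_conf_records a_record_profiles b_tokens
instance (high_conf_records : List String) (a_record_profiles : List (String × List (String × List String))) (b_tokens : List (List (String × String))) (out : List (String × Int)) : Decidable (Spec_get_class_compatible_middles high_conf_records a_record_profiles b_tokens out) := by unfold Spec_get_class_compatible_middles; infer_instance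

-- ===== CLAIM (what is proved, stated in full; the proofs are below) =====
def Claim_equal_get_class_compatible_middles : Prop := ∀ (high_conf_records : List String) (a_record_profiles : List (String × List (String × List String))) (b_tokens : List (List (String × String))), Dom_get_class_compatible_middles high_conf_records a_record_profiles b_tokens → Pre_get_class_compatible_middles high_conf_records a_record_profiles b_tokens → Spec_get_class_compatible_middles high_conf_records a_record_profiles b_tokens (get_class_compatible_middles high_conf_records a_record_profiles b_tokens)


-- ===== LEMMAS AND PROOFS =====

-- a batch of (key, increment) operations applied to a counter dict
def pvApplyOps (d : PySem.Dict String Int) (ops : List (String × Int)) : PySem.Dict String Int :=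
  ops.foldl (fun d p => d.insert p.1 (d.getD p.1 0 + p.2)) d

-- total increment a batch of operations adds to one key
def pvSumKey (m : String) (ops : List (String × Int)) : Int :=
  ((ops.filter (fun p => p.1 == m)).map (·.2)).sum

-- first occurrences in a stream of keys that are not yet `seen` (how a counter dict acquires new keys)
def pvNewKeys {α : Type} [BEq α] (seen : α → Bool) : List α → List α
  | [] => []
  | x :: rest => if seen x then pvNewKeys seen rest else x :: pvNewKeys (fun y => y == x || seen y) rest

-- the compatibility-and-truthiness test as a function of a token's signature
def pvQf (profile : List (String × List String)) (σ : String × String × String) : Bool :=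
  (σ.1 != "") && (pvProfGet profile "middles").contains σ.1
    && (pvProfGet profile "prefixes").contains σ.2.1
    && (pvProfGet profile "suffixes").contains σ.2.2

theorem pvSumKey_nil (m : String) : pvSumKey m [] = 0 := rfl

theorem pvNewKeys_nil {α : Type} [BEq α] (seen : α → Bool) : pvNewKeys seen ([] : List α) = [] := rfl

theorem pvNewKeys_cons {α : Type} [BEq α] (seen : α → Bool) (x : α) (rest : List α) :
    pvNewKeys seen (x :: rest)
      = if seen x then pvNewKeys seen rest else x :: pvNewKeys (fun y => y == x || seen y) rest := rfl

theorem pvCompatible_eq_filter (profile : List (String × List String)) (b_tokens : List (List (String × String))) :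
    get_compatible_b_tokens profile b_tokens
      = b_tokens.filter (fun bt =>
          (pvProfGet profile "middles").contains (pvTokGet bt "middle")
          && (pvProfGet profile "prefixes").contains (pvTokGet bt "prefix")
          && (pvProfGet profile "suffixes").contains (pvTokGet bt "suffix")) := by
  unfold get_compatible_b_tokens
  rw [PySem.List.foldl_append_if _ (fun x => x)]
  simp

theorem pvStepA (profile : List (String × List String)) (b_tokens : List (List (String × String))) :
    ∀ (acc : PySem.Dict String Int),
    (get_compatible_b_tokens profile b_tokens).foldl (fun acc t =>
        if pvTokGet t "middle" ≠ "" then PySem.Dict.modify acc (pvTokGet t "middle") 0 (· + 1)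
        else acc) acc
      = pvApplyOps acc (((b_tokens.map pvSig).filter (pvQf profile)).map (fun σ => (σ.1, (1 : Int)))) := by
  rw [pvCompatible_eq_filter]
  induction b_tokens with
  | nil => intro acc; rfl
  | cons bt rest ih =>
    intro acc
    simp only [List.filter_cons, List.map_cons]
    by_cases hq : ((pvProfGet profile "middles").contains (pvTokGet bt "middle")
        && (pvProfGet profile "prefixes").contains (pvTokGet bt "prefix")
        && (pvProfGet profile "suffixes").contains (pvTokGet bt "suffix")) = true
    · rw [if_pos hq]
      by_cases hm : pvTokGet bt "middle" ≠ ""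
      · have hqf : pvQf profile (pvSig bt) = true := by
          simp only [Bool.and_eq_true] at hq
          simp only [pvQf, pvSig, Bool.and_eq_true, bne_iff_ne, ne_eq]
          exact ⟨⟨⟨hm, hq.1.1⟩, hq.1.2⟩, hq.2⟩
        rw [if_pos hqf, List.map_cons, List.foldl_cons, if_pos hm]
        exact ih _
      · have hm' : pvTokGet bt "middle" = "" := by simpa using hm
        have hqf : pvQf profile (pvSig bt) = false := by
          simp [pvQf, pvSig, hm']
        rw [if_neg (by simp [hqf]), List.foldl_cons, if_neg hm]
        exact ih acc
    · rw [if_neg hq]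
      have hq' : ((pvProfGet profile "middles").contains (pvTokGet bt "middle")
          && ((pvProfGet profile "prefixes").contains (pvTokGet bt "prefix")
          && (pvProfGet profile "suffixes").contains (pvTokGet bt "suffix"))) = false := by
        rw [← Bool.and_assoc]; simpa using hq
      have hqf : pvQf profile (pvSig bt) = false := by
        simp only [pvQf, pvSig, Bool.and_assoc]
        rw [hq', Bool.and_false]
      rw [if_neg (by simp [hqf])]
      exact ih acc

theorem pvStepB (profile : List (String × List String)) (L : List (String × String × String))
    (w : String × String × String → Int) :
    ∀ (acc : PySem.Dict String Int),
    (L.map (fun σ => (σ, w σ))).foldl (fun acc sc =>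
        if ((sc.1.1 != "") && (pvProfGet profile "middles").contains sc.1.1
            && (pvProfGet profile "prefixes").contains sc.1.2.1
            && (pvProfGet profile "suffixes").contains sc.1.2.2) = true then
          PySem.Dict.modify acc sc.1.1 0 (· + sc.2)
        else acc) acc
      = pvApplyOps acc ((L.filter (pvQf profile)).map (fun σ => (σ.1, w σ))) := by
  induction L with
  | nil => intro acc; rfl
  | cons σ rest ih =>
    intro acc
    simp only [List.map_cons, List.foldl_cons, List.filter_cons]
    by_cases hq : pvQf profile σ = true
    · rw [if_pos (by simpa [pvQf] using hq), if_pos hq, List.map_cons]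
      exact ih _
    · rw [if_neg (by simpa [pvQf] using hq), if_neg (by simpa using hq)]
      exact ih acc

theorem pvIndSum {α : Type} [DecidableEq α] (L : List α) (y : α) (hL : L.Nodup) :
    (L.map (fun σ => if y = σ then (1 : Int) else 0)).sum = if y ∈ L then 1 else 0 := by
  induction L with
  | nil => simp
  | cons x rest ih =>
    simp only [List.map_cons, List.sum_cons, List.nodup_cons] at *
    by_cases hyx : y = x
    · subst hyx
      simp [hL.1, ih hL.2]
    · simp [hyx, ih hL.2]

theorem pvSumCount {α : Type} [DecidableEq α] [BEq α] [LawfulBEq α] (t : List α) :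
    ∀ (D : List α) (P : α → Bool), D.Nodup → (∀ y ∈ t, y ∈ D) →
    (((D.filter P).map (fun σ => (t.count σ : Int))).sum) = (t.countP P : Int) := by
  induction t with
  | nil => intro D P _ _; simp
  | cons y t' ih =>
    intro D P hD hmem
    have hcnt : ∀ σ : α, (((y :: t').count σ : Nat) : Int) = (t'.count σ : Int) + (if y = σ then 1 else 0) := by
      intro σ
      rw [List.count_cons]
      by_cases h : y = σ <;> simp [h]
    have h1 : ((D.filter P).map (fun σ => (((y :: t').count σ : Nat) : Int))).sum
        = ((D.filter P).map (fun σ => (t'.count σ : Int) + (if y = σ then 1 else 0))).sum := by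
      congr 1
      exact List.map_congr_left (fun σ _ => hcnt σ)
    rw [h1, PySem.List.sum_map_add_int]
    rw [ih D P hD (fun z hz => hmem z (List.mem_cons_of_mem _ hz))]
    rw [pvIndSum _ y (List.Nodup.filter _ hD)]
    rw [List.countP_cons]
    by_cases hP : P y = true
    · have hyD : y ∈ D.filter P := by
        rw [List.mem_filter]
        exact ⟨hmem y List.mem_cons_self, hP⟩
      simp [hP, hyD]
    · have hyD : y ∉ D.filter P := by
        rw [List.mem_filter]
        intro h; exact absurd h.2 hP
      simp [hP, hyD]

theorem pvSums (profile : List (String × List String)) (xs : List (String × String × String)) (m : String) :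
    (((((xs.filter (pvQf profile)).map (fun σ => (σ.1, (1 : Int)))).filter (fun p => p.1 == m)).map (·.2)).sum)
      = ((((((PySem.Set.ofList xs).filter (pvQf profile)).map (fun σ => (σ.1, (xs.count σ : Int)))).filter (fun p => p.1 == m)).map (·.2)).sum) := by
  have key : ∀ (L : List (String × String × String)) (w : (String × String × String) → Int),
      ((((L.filter (pvQf profile)).map (fun σ => (σ.1, w σ))).filter (fun p => p.1 == m)).map (·.2)).sum
        = ((L.filter (fun σ => pvQf profile σ && (σ.1 == m))).map w).sum := by
    intro L w
    rw [List.filter_map, List.map_map, List.filter_filter]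
    have : (fun a => ((fun (p : String × Int) => p.1 == m) ∘ fun σ : String × String × String => (σ.1, w σ)) a && pvQf profile a)
        = (fun σ : String × String × String => pvQf profile σ && (σ.1 == m)) := by
      funext σ; simp [Bool.and_comm]
    rw [this]
    rfl
  rw [key, key]
  have h1 : ((xs.filter (fun σ => pvQf profile σ && (σ.1 == m))).map (fun _ => (1 : Int))).sum
      = ((xs.countP (fun σ => pvQf profile σ && (σ.1 == m))) : Int) := by
    rw [PySem.List.sum_map_const_int, ← List.countP_eq_length_filter]
    ring
  have h2 := pvSumCount xs (PySem.Set.ofList xs) (fun σ => pvQf profile σ && (σ.1 == m))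
    (PySem.Set.nodup_ofList xs) (fun y hy => (PySem.Set.mem_ofList xs y).2 hy)
  rw [h1, ← h2]

theorem pvKeysEq {α β : Type} [BEq α] [LawfulBEq α] [BEq β] [LawfulBEq β]
    (q : α → Bool) (mid : α → β) (xs : List α) :
    ∀ (seen : β → Bool) (sσ : α → Bool),
    (∀ σ, sσ σ = true → q σ = true → seen (mid σ) = true) →
    pvNewKeys seen ((xs.filter q).map mid)
      = pvNewKeys seen (((pvNewKeys sσ xs).filter q).map mid) := by
  induction xs with
  | nil => intro seen sσ _; rfl
  | cons x rest ih =>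
    intro seen sσ hinv
    rw [pvNewKeys_cons]
    simp only [List.filter_cons]
    by_cases hsx : sσ x = true
    · rw [if_pos hsx]
      by_cases hqx : q x = true
      · rw [if_pos hqx, List.map_cons, pvNewKeys_cons, if_pos (hinv x hsx hqx)]
        exact ih seen sσ hinv
      · rw [if_neg hqx]
        exact ih seen sσ hinv
    · rw [if_neg hsx]
      by_cases hqx : q x = true
      · rw [if_pos hqx, List.map_cons, List.filter_cons, if_pos hqx, List.map_cons,
          pvNewKeys_cons, pvNewKeys_cons]
        by_cases hseen : seen (mid x) = true
        · rw [if_pos hseen, if_pos hseen]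
          apply ih
          intro σ hσ hqσ
          rcases Bool.or_eq_true_iff.1 hσ with h | h
          · have : σ = x := by simpa using h
            subst this; exact hseen
          · exact hinv σ h hqσ
        · rw [if_neg hseen, if_neg hseen]
          congr 1
          apply ih
          intro σ hσ hqσ
          rcases Bool.or_eq_true_iff.1 hσ with h | h
          · have : σ = x := by simpa using h
            subst this; simp
          · rw [Bool.or_eq_true_iff]
            exact Or.inr (hinv σ h hqσ)
      · rw [if_neg hqx, List.filter_cons, if_neg hqx]
        apply ih
        intro σ hσ hqσ
        rcases Bool.or_eq_true_iff.1 hσ with h | h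
        · have : σ = x := by simpa using h
          subst this
          exact absurd hqσ hqx
        · exact hinv σ h hqσ

theorem pvNewKeys_mem_not_seen {α : Type} [BEq α] [LawfulBEq α] (l : List α) :
    ∀ (seen : α → Bool) (y : α), y ∈ pvNewKeys seen l → seen y = false := by
  induction l with
  | nil => intro seen y h; simp [pvNewKeys] at h
  | cons x rest ih =>
    intro seen y h
    rw [pvNewKeys_cons] at h
    by_cases hx : seen x
    · simp [hx] at h; exact ih seen y h
    · simp [hx] at h
      rcases h with h | h
      · subst h; simpa using hx
      · have := ih _ y h
        simp only [Bool.or_eq_false_iff] at this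
        exact this.2

theorem pvSet_foldl_add {α : Type} [BEq α] [LawfulBEq α] (l : List α) :
    ∀ (acc : List α), l.foldl PySem.Set.add acc = acc ++ pvNewKeys (fun y => acc.contains y) l := by
  induction l with
  | nil => intro acc; simp [pvNewKeys]
  | cons x rest ih =>
    intro acc
    simp only [List.foldl_cons]
    rw [pvNewKeys_cons]
    by_cases hx : acc.contains x
    · have : PySem.Set.add acc x = acc := by
        simp only [PySem.Set.add, PySem.Set.contains, hx, if_pos]
      rw [this, ih acc, hx]; simp
    · have hx' : acc.contains x = false := by simpa using hx
      have : PySem.Set.add acc x = acc ++ [x] := by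
        simp only [PySem.Set.add, PySem.Set.contains, hx']
        simp
      rw [this, ih (acc ++ [x])]
      have hfun : (fun y => (acc ++ [x]).contains y) = (fun y => y == x || acc.contains y) := by
        funext y
        rw [List.contains_append]
        cases h : (y == x)
        · simp_all [List.contains_cons]
        · simp_all [List.contains_cons]
      rw [hfun, if_neg (by exact hx)]
      simp

theorem pvOfList_eq_newKeys {α : Type} [BEq α] [LawfulBEq α] (l : List α) :
    PySem.Set.ofList l = pvNewKeys (fun _ => false) l := by
  have := pvSet_foldl_add l []
  simpa [PySem.Set.ofList, PySem.Set.empty] using this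

theorem pvSumKey_cons (m : String) (p : String × Int) (ops : List (String × Int)) :
    pvSumKey m (p :: ops) = (if p.1 == m then p.2 else 0) + pvSumKey m ops := by
  simp only [pvSumKey, List.filter_cons]
  by_cases h : p.1 == m <;> simp [h]
theorem pvCanon (ops : List (String × Int)) :
    ∀ (d : PySem.Dict String Int), d.keys.Nodup →
    (pvApplyOps d ops).items
      = d.items.map (fun p => (p.1, p.2 + pvSumKey p.1 ops))
        ++ (pvNewKeys d.contains (ops.map (·.1))).map (fun m => (m, pvSumKey m ops)) := by
  induction ops with
  | nil =>
    intro d _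
    show d.items = _
    simp only [List.map_nil, pvNewKeys_nil, List.append_nil, pvSumKey_nil, add_zero]
    simp
  | cons op rest ih =>
    intro d hnd
    obtain ⟨m, c⟩ := op
    have hstep : pvApplyOps d ((m, c) :: rest) = pvApplyOps (d.insert m (d.getD m 0 + c)) rest := rfl
    rw [hstep, ih _ (PySem.Dict.nodup_keys_insert d m _ hnd)]
    by_cases hc : d.contains m
    · rw [PySem.Dict.items_insert_of_contains d _ hc]
      have hkeys : (d.insert m (d.getD m 0 + c)).contains = d.contains := by
        funext y
        rw [PySem.Dict.contains_insert]
        by_cases hy : y == m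
        · have : y = m := by simpa using hy
          simp [this, hc]
        · simp [hy]
      rw [hkeys]
      have hmap : (d.items.map (fun p => if (p.1 == m) = true then (m, d.getD m 0 + c) else p)).map
            (fun p => (p.1, p.2 + pvSumKey p.1 rest))
          = d.items.map (fun p => (p.1, p.2 + pvSumKey p.1 ((m, c) :: rest))) := by
        rw [List.map_map]
        apply List.map_congr_left
        intro p hp
        obtain ⟨k, v⟩ := p
        rw [pvSumKey_cons]
        by_cases hpm : k == m
        · have hk : k = m := by simpa using hpm
          subst hk
          have hval : d.getD k 0 = v := PySem.Dict.getD_of_mem_items d hp hnd 0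
          simp [Function.comp, hval]
          ring
        · have hk : ¬ k = m := by simpa using hpm
          have hmk : ¬ ((m == k) = true) := fun h => hk ((beq_iff_eq.mp h).symm)
          simp [Function.comp, hpm, hmk]
      rw [hmap]
      have hnkeq : pvNewKeys d.contains (((m, c) :: rest).map (·.1))
          = pvNewKeys d.contains (rest.map (·.1)) := by
        rw [List.map_cons, pvNewKeys_cons, if_pos hc]
      rw [hnkeq]
      congr 1
      apply List.map_congr_left
      intro k hk
      have hkns : d.contains k = false := pvNewKeys_mem_not_seen _ _ _ hk
      have hkm : ¬ (k = m) := by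
        intro h
        rw [h] at hkns; rw [hkns] at hc; exact Bool.false_ne_true hc
      rw [pvSumKey_cons]
      have hmk : ¬ ((m == k) = true) := fun h => hkm ((beq_iff_eq.mp h).symm)
      simp [hmk]
    · have hc' : d.contains m = false := by simpa using hc
      rw [PySem.Dict.items_insert_of_not_contains d _ hc']
      have hgd : d.getD m (0 : Int) = 0 := PySem.Dict.getD_of_not_contains d 0 hc'
      rw [hgd, List.map_append]
      have hkeys : (d.insert m (d.getD m 0 + c)).contains = (fun y => y == m || d.contains y) := by
        funext y; rw [PySem.Dict.contains_insert]
      rw [hgd] at hkeys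
      rw [hkeys]
      have hmemkeys : ∀ p ∈ d.items, ¬ (p.1 = m) := by
        intro p hp h
        have : d.contains m = true := by
          have : (p.1 == m) = true := by simpa using h
          exact List.any_eq_true.2 ⟨p, hp, this⟩
        rw [hc'] at this; exact Bool.false_ne_true this
      have hmapd : d.items.map (fun p => (p.1, p.2 + pvSumKey p.1 rest))
          = d.items.map (fun p => (p.1, p.2 + pvSumKey p.1 ((m, c) :: rest))) := by
        apply List.map_congr_left
        intro p hp
        rw [pvSumKey_cons]
        have : ¬ ((m == p.1) = true) := fun h => hmemkeys p hp ((beq_iff_eq.mp h).symm)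
        simp [this]
      rw [hmapd]
      have hnkeq : pvNewKeys d.contains (((m, c) :: rest).map (·.1))
          = m :: pvNewKeys (fun y => y == m || d.contains y) (rest.map (·.1)) := by
        rw [List.map_cons, pvNewKeys_cons, if_neg (by simp [hc'])]
      rw [hnkeq]
      simp only [List.map_cons, List.map_nil, List.nil_append, List.cons_append, List.append_nil,
        List.append_assoc]
      congr 1
      congr 1
      · rw [pvSumKey_cons]; simp
      · apply List.map_congr_left
        intro k hk
        have hkns := pvNewKeys_mem_not_seen _ _ _ hk
        have hkm : ¬ ((m == k) = true) := by
          intro h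
          have hk2 : k = m := (beq_iff_eq.mp h).symm
          rw [hk2] at hkns; simp at hkns
        rw [pvSumKey_cons]
        simp [hkm]

theorem pvRec (profile : List (String × List String)) (b_tokens : List (List (String × String)))
    (acc : PySem.Dict String Int) (hnd : acc.keys.Nodup) :
    pvApplyOps acc (((b_tokens.map pvSig).filter (pvQf profile)).map (fun σ => (σ.1, (1 : Int))))
      = pvApplyOps acc (((PySem.Set.ofList (b_tokens.map pvSig)).filter (pvQf profile)).map
          (fun σ => (σ.1, ((b_tokens.map pvSig).count σ : Int)))) := by
  apply PySem.Dict.ext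
  rw [pvCanon _ acc hnd, pvCanon _ acc hnd]
  have hsums : ∀ k : String,
      pvSumKey k (((b_tokens.map pvSig).filter (pvQf profile)).map (fun σ => (σ.1, (1 : Int))))
        = pvSumKey k (((PySem.Set.ofList (b_tokens.map pvSig)).filter (pvQf profile)).map
            (fun σ => (σ.1, ((b_tokens.map pvSig).count σ : Int)))) :=
    fun k => pvSums profile (b_tokens.map pvSig) k
  have hfst : ∀ (L : List (String × String × String)) (w : (String × String × String) → Int),
      ((L.map (fun σ => (σ.1, w σ))).map (fun p => p.1)) = L.map (fun σ => σ.1) := by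
    intro L w; rw [List.map_map]; rfl
  have hkeys : pvNewKeys acc.contains
        ((((b_tokens.map pvSig).filter (pvQf profile)).map (fun σ => (σ.1, (1 : Int)))).map (fun p => p.1))
      = pvNewKeys acc.contains
        ((((PySem.Set.ofList (b_tokens.map pvSig)).filter (pvQf profile)).map
            (fun σ => (σ.1, ((b_tokens.map pvSig).count σ : Int)))).map (fun p => p.1)) := by
    rw [hfst, hfst]
    rw [pvOfList_eq_newKeys]
    exact pvKeysEq (pvQf profile) (fun σ => σ.1) (b_tokens.map pvSig) acc.contains (fun _ => false)
      (fun σ h => absurd h (by simp))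
  congr 1
  · apply List.map_congr_left
    intro p _
    rw [hsums p.1]
  · rw [hkeys]
    apply List.map_congr_left
    intro k _
    rw [hsums k]

theorem pvApplyOps_nodup (ops : List (String × Int)) :
    ∀ (d : PySem.Dict String Int), d.keys.Nodup → (pvApplyOps d ops).keys.Nodup := by
  induction ops with
  | nil => intro d h; exact h
  | cons op rest ih =>
    intro d h
    exact ih _ (PySem.Dict.nodup_keys_insert d op.1 _ h)

theorem pvMain (a_record_profiles : List (String × List (String × List String)))
    (b_tokens : List (List (String × String))) (high_conf_records : List String) :
    ∀ (d : PySem.Dict String Int) (sc0 : Option (PySem.Dict (String × String × String) Int)),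
    d.keys.Nodup →
    (sc0 = none ∨ sc0 = some (PySem.Dict.counter (b_tokens.map pvSig))) →
    high_conf_records.foldl (fun acc record_id =>
      if (PySem.Dict.mk a_record_profiles).contains record_id then
        (get_compatible_b_tokens ((PySem.Dict.mk a_record_profiles).getD record_id []) b_tokens).foldl
          (fun acc t =>
            if pvTokGet t "middle" ≠ "" then
              PySem.Dict.modify acc (pvTokGet t "middle") 0 (· + 1)
            else acc) acc
      else acc) d
    = (high_conf_records.foldl
        (fun (st : PySem.Dict String Int × Option (PySem.Dict (String × String × String) Int)) record_id =>
          if (PySem.Dict.mk a_record_profiles).contains record_id then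
            ((st.2.getD (PySem.Dict.counter (b_tokens.map pvSig))).items.foldl (fun result sc =>
              if ((sc.1.1 != "")
                  && (pvProfGet ((PySem.Dict.mk a_record_profiles).getD record_id []) "middles").contains sc.1.1
                  && (pvProfGet ((PySem.Dict.mk a_record_profiles).getD record_id []) "prefixes").contains sc.1.2.1
                  && (pvProfGet ((PySem.Dict.mk a_record_profiles).getD record_id []) "suffixes").contains sc.1.2.2) = true then
                PySem.Dict.modify result sc.1.1 0 (· + sc.2)
              else result) st.1,
             some (st.2.getD (PySem.Dict.counter (b_tokens.map pvSig))))
          else st) (d, sc0)).1 := by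
  induction high_conf_records with
  | nil => intro d sc0 _ _; rfl
  | cons rid rest ih =>
    intro d sc0 hnd hsc
    simp only [List.foldl_cons]
    by_cases hcont : (PySem.Dict.mk a_record_profiles).contains rid = true
    · rw [if_pos hcont, if_pos hcont]
      have hA := pvStepA ((PySem.Dict.mk a_record_profiles).getD rid []) b_tokens d
      have hB : (PySem.Dict.counter (b_tokens.map pvSig)).items.foldl (fun result sc =>
          if ((sc.1.1 != "")
              && (pvProfGet ((PySem.Dict.mk a_record_profiles).getD rid []) "middles").contains sc.1.1
              && (pvProfGet ((PySem.Dict.mk a_record_profiles).getD rid []) "prefixes").contains sc.1.2.1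
              && (pvProfGet ((PySem.Dict.mk a_record_profiles).getD rid []) "suffixes").contains sc.1.2.2) = true then
            PySem.Dict.modify result sc.1.1 0 (· + sc.2)
          else result) d
          = pvApplyOps d (((PySem.Set.ofList (b_tokens.map pvSig)).filter
              (pvQf ((PySem.Dict.mk a_record_profiles).getD rid []))).map
              (fun σ => (σ.1, ((b_tokens.map pvSig).count σ : Int)))) := by
        rw [PySem.Dict.items_counter]
        exact pvStepB ((PySem.Dict.mk a_record_profiles).getD rid [])
          (PySem.Set.ofList (b_tokens.map pvSig))
          (fun σ => ((b_tokens.map pvSig).count σ : Int)) d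
      rcases hsc with h | h <;> subst h <;>
        simp only [Option.getD_none, Option.getD_some] <;>
        rw [hA, hB, pvRec _ _ _ hnd] <;>
        exact ih _ _ (pvApplyOps_nodup _ d hnd) (Or.inr rfl)
    · rw [if_neg hcont, if_neg hcont]
      exact ih d sc0 hnd hsc

-- ===== VERDICT (by name: the statement is the Claim_ definition above) =====
theorem get_class_compatible_middles_spec : Claim_equal_get_class_compatible_middles := by
  intro high_conf_records a_record_profiles b_tokens _ _
  unfold Spec_get_class_compatible_middles get_class_compatible_middles get_class_compatible_middles_alt
  exact congrArg (fun d => d.items)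
    (pvMain a_record_profiles b_tokens high_conf_records PySem.Dict.empty none
      PySem.Dict.nodup_keys_empty (Or.inl rfl))
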